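-- pv_equiv track=rewrite | github.com/CocoRoF/Contextifier | contextifier_new/handlers/csv/content_extractor.py | _has_merged_cells
-- ===== SOURCE A (Python) =====
-- from typing import Any, Dict, List, Optional, TYPE_CHECKING
--
-- def _has_merged_cells(rows: List[List[str]]) -> bool:
--     """
--     Detect whether empty cells suggest merged regions.
--
--     Merge patterns:
--     - Vertical: empty cell in first column with non-empty above.
--     - Horizontal: empty cell right-adjacent to a non-empty cell.
--
--     Args:
--         rows: Parsed row data.
--
--     Returns:
--         True if merge patterns are detected.
--     """
--     if not rows or len(rows) < 2:
--         return False
--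
--     for row_idx, row in enumerate(rows):
--         for col_idx, cell in enumerate(row):
--             cell_value = cell.strip() if cell else ""
--             if cell_value:
--                 continue
--
--             # Vertical merge indicator: empty first column, non-first row
--             if row_idx > 0 and col_idx == 0:
--                 return True
--
--             # Horizontal merge indicator: previous cell is non-empty
--             if col_idx > 0:
--                 prev = row[col_idx - 1].strip() if col_idx - 1 < len(row) else ""
--                 if prev:
--                     return True
--
--     return False
-- ===== SOURCE B (Python) =====
-- from typing import List
--
-- def _has_merged_cells(rows: List[List[str]]) -> bool:
--     if len(rows) < 2:
--         return False
--     # Encode each row as a signature string: 'N' = non-empty cell, 'E' = empty cell.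
--     sigs = ["".join("N" if c.strip() else "E" for c in row) for row in rows]
--     # Vertical merge: a later row whose signature starts with 'E'.
--     # Horizontal merge: the pattern "NE" occurs somewhere in a row's signature.
--     return any(s.startswith("E") for s in sigs[1:]) or any("NE" in s for s in sigs)
-- ===== Notes on version B (the rewrite author's own statement) =====
-- stated objective: alternative
-- what changed: Re-represents each row as an 'E'/'N' signature string and decides merges by string pattern matching (startswith('E') on later rows, substring search for 'NE') instead of A's interleaved per-cell loop with index bookkeeping and early returns.
import Mathlib
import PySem

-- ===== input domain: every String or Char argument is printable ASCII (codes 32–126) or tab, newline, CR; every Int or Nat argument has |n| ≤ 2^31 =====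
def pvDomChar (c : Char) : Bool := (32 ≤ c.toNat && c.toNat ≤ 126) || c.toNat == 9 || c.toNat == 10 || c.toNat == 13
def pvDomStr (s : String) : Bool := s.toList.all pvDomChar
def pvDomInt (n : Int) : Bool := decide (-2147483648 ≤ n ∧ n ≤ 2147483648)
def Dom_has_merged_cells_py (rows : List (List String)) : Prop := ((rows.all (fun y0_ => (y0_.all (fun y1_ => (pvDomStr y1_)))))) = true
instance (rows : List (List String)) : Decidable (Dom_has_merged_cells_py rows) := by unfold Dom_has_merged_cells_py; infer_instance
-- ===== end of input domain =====

-- B re-represents each row as an 'E'/'N' signature string and decides both merge patterns by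
-- string matching (startswith "E" on later rows, substring search for "NE") instead of A's
-- interleaved per-cell loop; objective: alternative.

-- ===== PORT A =====
-- inner loop over the cells of one row: j is col_idx, suffix the remaining cells
def pvCellLoop (i : Nat) (row : List String) : Nat → List String → Bool
  | _, [] => false
  | j, cell :: rest =>
    let cellValue := if cell ≠ "" then PySem.Str.strip cell else ""
    if cellValue ≠ "" then pvCellLoop i row (j + 1) rest
    else if 0 < i ∧ j = 0 then true
    else if 0 < j then
      let prev := if (j : Int) - 1 < (row.length : Int) then
          PySem.Str.strip ((PySem.List.pyGet? row ((j : Int) - 1)).getD "") else ""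
      if prev ≠ "" then true else pvCellLoop i row (j + 1) rest
    else pvCellLoop i row (j + 1) rest

-- outer loop over the rows: i is row_idx
def pvRowLoop : Nat → List (List String) → Bool
  | _, [] => false
  | i, row :: rest => if pvCellLoop i row 0 row then true else pvRowLoop (i + 1) rest

def has_merged_cells_py (rows : List (List String)) : Bool :=
  if rows = [] ∨ rows.length < 2 then false else pvRowLoop 0 rows

-- ===== PORT B =====
-- the signature string of a row: 'N' for a non-empty stripped cell, 'E' for an empty one
def pvSig (row : List String) : String :=
  String.ofList (row.map fun c => if PySem.Str.strip c ≠ "" then 'N' else 'E')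

def has_merged_cells_py_alt (rows : List (List String)) : Bool :=
  if rows.length < 2 then false
  else
    let sigs := rows.map pvSig
    (sigs.drop 1).any (fun s => PySem.Str.startswith s "E")
      || sigs.any (fun s => PySem.Str.isIn "NE" s)

-- ===== PRECONDITION & SPEC =====
def Spec_has_merged_cells_py (rows : List (List String)) (out : Bool) : Prop := out = has_merged_cells_py_alt rows
instance (rows : List (List String)) (out : Bool) : Decidable (Spec_has_merged_cells_py rows out) := by unfold Spec_has_merged_cells_py; infer_instance

-- ===== CLAIM (what is proved, stated in full; the proofs are below) =====
def Claim_equal_has_merged_cells_py : Prop := ∀ (rows : List (List String)), Dom_has_merged_cells_py rows → Spec_has_merged_cells_py rows (has_merged_cells_py rows)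

-- ===== LEMMAS AND PROOFS =====

-- proof-side per-row indicators (A's loop is reduced to these, and B's string tests are too)
def pvVert (row : List String) : Bool :=
  match row with
  | [] => false
  | c :: _ => PySem.Str.strip c == ""

def pvHoriz (row : List String) : Bool :=
  (row.zip (row.drop 1)).any fun p => (PySem.Str.strip p.1 != "") && (PySem.Str.strip p.2 == "")

lemma strip_if_eq (cell : String) :
    (if cell ≠ "" then PySem.Str.strip cell else "") = PySem.Str.strip cell := by
  by_cases h : cell = ""
  · simp [h]; decide
  · simp [h]

-- A's inner loop from column j (with `prev` the cell at column j-1) equals the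
-- adjacent-pair scan over the remaining cells.
lemma cellLoop_eq (i : Nat) (row : List String) :
    ∀ (suffix : List String) (j : Nat) (prev : String), 1 ≤ j →
      row.drop (j - 1) = prev :: suffix →
      pvCellLoop i row j suffix =
        ((prev :: suffix).zip suffix).any
          (fun p => (PySem.Str.strip p.1 != "") && (PySem.Str.strip p.2 == "")) := by
  intro suffix
  induction suffix with
  | nil => intro j prev _ _; simp [pvCellLoop]
  | cons cell rest ih =>
    intro j prev hj hdrop
    have hget : row[j - 1]? = some prev := by
      have h0 : (row.drop (j - 1))[0]? = row[(j - 1) + 0]? := List.getElem?_drop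
      rw [hdrop] at h0
      simpa using h0.symm
    have hlen : j - 1 < row.length := (List.getElem?_eq_some_iff.mp hget).1
    have hcast : (j : Int) - 1 = ((j - 1 : Nat) : Int) := by omega
    have hgetI : PySem.List.pyGet? row ((j : Int) - 1) = some prev := by
      rw [hcast, PySem.List.pyGet?_natCast, hget]
    have hlt : (j : Int) - 1 < (row.length : Int) := by
      rw [hcast]; exact_mod_cast hlen
    have hdrop' : row.drop ((j + 1) - 1) = cell :: rest := by
      have : (j : Nat) = (j - 1) + 1 := by omega
      have h2 : row.drop j = cell :: rest := by
        rw [this, ← List.drop_drop, hdrop]; simp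
      simpa using h2
    rw [pvCellLoop]
    simp only [strip_if_eq, hlt, if_pos, hgetI, Option.getD_some]
    by_cases hcv : PySem.Str.strip cell = ""
    · have hij : ¬ (0 < i ∧ j = 0) := by omega
      by_cases hp : PySem.Str.strip prev = ""
      · simp only [hcv, hij, hp, if_neg, ne_eq, not_true_eq_false, not_false_eq_true]
        simp only [show (0 < j) from hj, if_pos]
        rw [ih (j + 1) cell (by omega) hdrop']
        simp [hcv, hp]
      · simp only [hcv, hij, hp, ne_eq, not_true_eq_false, not_false_eq_true, if_neg, if_pos]
        simp only [show (0 < j) from hj, if_pos]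
        simp [hcv, hp]
    · simp only [ne_eq, hcv, not_false_eq_true, if_pos]
      rw [ih (j + 1) cell (by omega) hdrop']
      simp [hcv]

-- one full row of A's loop = (row_idx > 0 && vertical indicator) || horizontal indicator
lemma cellLoop_top (i : Nat) (row : List String) :
    pvCellLoop i row 0 row = ((decide (0 < i) && pvVert row) || pvHoriz row) := by
  cases row with
  | nil => simp [pvCellLoop, pvVert, pvHoriz]
  | cons c rest =>
    rw [pvCellLoop]
    have hpairs := cellLoop_eq i (c :: rest) rest 1 c (le_refl 1) (by simp)
    simp only [strip_if_eq]
    by_cases hcv : PySem.Str.strip c = ""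
    · have hne : ¬ (PySem.Str.strip c ≠ "") := by simpa using hcv
      rw [if_neg hne]
      by_cases hi : 0 < i
      · rw [if_pos (by simp [hi])]
        simp [pvVert, hcv, hi]
      · rw [if_neg (fun hh => hi hh.1), if_neg (lt_irrefl 0), hpairs]
        simp [pvVert, pvHoriz, hi]
    · rw [if_pos hcv, hpairs]
      have hv : pvVert (c :: rest) = false := by simp [pvVert, hcv]
      rw [hv, Bool.and_false, Bool.false_or]
      simp [pvHoriz]

lemma rowLoop_pos (rows : List (List String)) :
    ∀ i : Nat, 0 < i → pvRowLoop i rows = (rows.any pvVert || rows.any pvHoriz) := by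
  induction rows with
  | nil => intro i _; simp [pvRowLoop]
  | cons row rest ih =>
    intro i hi
    rw [pvRowLoop, cellLoop_top, ih (i + 1) (by omega)]
    simp only [hi, decide_true, Bool.true_and, List.any_cons]
    cases pvVert row <;> cases pvHoriz row <;> cases rest.any pvVert <;>
      cases rest.any pvHoriz <;> simp

lemma rowLoop_zero (rows : List (List String)) :
    pvRowLoop 0 rows = ((rows.drop 1).any pvVert || rows.any pvHoriz) := by
  cases rows with
  | nil => simp [pvRowLoop]
  | cons row rest =>
    rw [pvRowLoop, cellLoop_top, rowLoop_pos rest 1 (by omega)]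
    simp only [decide_false, Bool.false_and, Bool.false_or, List.any_cons, List.drop_one,
      List.tail_cons, lt_irrefl]
    cases pvHoriz row <;> cases rest.any pvVert <;> cases rest.any pvHoriz <;> simp

-- B's string tests, reduced to the same per-row indicators --------------------

lemma sig_toList (row : List String) :
    (pvSig row).toList = row.map fun c => if PySem.Str.strip c ≠ "" then 'N' else 'E' := by
  simp [pvSig]

lemma startswith_sig (row : List String) :
    PySem.Str.startswith (pvSig row) "E" = pvVert row := by
  rw [PySem.Str.startswith_eq, sig_toList]
  cases row with
  | nil => simp [pvVert, PySem.Chars.startswith]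
  | cons c rest =>
    by_cases h : PySem.Str.strip c = ""
    · simp [pvVert, h, PySem.Chars.startswith, List.isPrefixOf]
    · simp [pvVert, h, PySem.Chars.startswith, List.isPrefixOf]

-- ['N','E'] is an infix of a character list iff some adjacent pair is (N, E)
lemma ne_infix_iff (l : List Char) :
    (['N', 'E'] <:+: l) ↔ ∃ k, l[k]? = some 'N' ∧ l[k+1]? = some 'E' := by
  induction l with
  | nil => simp
  | cons a rest ih =>
    rw [List.infix_cons_iff]
    constructor
    · rintro (⟨t, ht⟩ | hin)
      · cases rest with
        | nil => simp at ht
        | cons b rest' =>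
          obtain ⟨ha, hb, _⟩ := by simpa using ht
          exact ⟨0, by simp [ha.symm, hb.symm]⟩
      · obtain ⟨k, h1, h2⟩ := ih.mp hin
        exact ⟨k + 1, by simpa using h1, by simpa using h2⟩
    · rintro ⟨k, h1, h2⟩
      cases k with
      | zero =>
        cases rest with
        | nil => simp at h2
        | cons b rest' =>
          left
          obtain ha := by simpa using h1
          obtain hb := by simpa using h2
          exact ⟨rest', by simp [ha, hb]⟩
      | succ k' =>
        right
        exact ih.mpr ⟨k', by simpa using h1, by simpa using h2⟩

lemma isIn_sig (row : List String) :
    PySem.Str.isIn "NE" (pvSig row) = pvHoriz row := by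
  rw [Bool.eq_iff_iff, PySem.Str.isIn_iff_infix, sig_toList]
  show (['N', 'E'] <:+: _) ↔ _
  rw [ne_infix_iff]
  unfold pvHoriz
  rw [Bool.eq_iff_iff.mp rfl, List.any_eq_true]
  constructor
  · rintro ⟨k, h1, h2⟩
    simp only [List.getElem?_map] at h1 h2
    obtain ⟨c1, hc1, he1⟩ := Option.map_eq_some_iff.mp h1
    obtain ⟨c2, hc2, he2⟩ := Option.map_eq_some_iff.mp h2
    have hs1 : PySem.Str.strip c1 ≠ "" := by
      by_contra h; simp [h] at he1
    have hs2 : PySem.Str.strip c2 = "" := by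
      by_contra h; simp [h] at he2
    refine ⟨(c1, c2), ?_, by simp [hs1, hs2]⟩
    rw [List.mem_iff_getElem?]
    exact ⟨k, by rw [List.getElem?_zip_eq_some]; exact ⟨hc1, by simpa [List.getElem?_drop] using hc2⟩⟩
  · rintro ⟨⟨c1, c2⟩, hmem, hp⟩
    obtain ⟨k, hk⟩ := List.mem_iff_getElem?.mp hmem
    rw [List.getElem?_zip_eq_some] at hk
    obtain ⟨hk1, hk2⟩ := hk
    simp only [List.getElem?_drop] at hk2
    simp only [bne_iff_ne, ne_eq, beq_iff_eq, Bool.and_eq_true] at hp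
    refine ⟨k, ?_, ?_⟩
    · simp [hk1, hp.1]
    · rw [show k + 1 = 1 + k by omega]
      simp [hk2, hp.2]

lemma alt_eq (rows : List (List String)) (h : ¬ rows.length < 2) :
    has_merged_cells_py_alt rows = ((rows.drop 1).any pvVert || rows.any pvHoriz) := by
  unfold has_merged_cells_py_alt
  rw [if_neg h]
  simp only [← List.map_drop, List.any_map]
  congr 1
  · exact List.any_congr rfl fun row => startswith_sig row
  · exact List.any_congr rfl fun row => isIn_sig row

-- ===== VERDICT (by name: the statement is the Claim_ definition above) =====
theorem has_merged_cells_py_spec : Claim_equal_has_merged_cells_py := by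
  intro rows _
  unfold Spec_has_merged_cells_py has_merged_cells_py
  by_cases h : rows.length < 2
  · rw [if_pos (Or.inr h)]
    unfold has_merged_cells_py_alt
    rw [if_pos h]
  · have hne : ¬ (rows = [] ∨ rows.length < 2) := by
      intro hc
      rcases hc with hc | hc
      · exact h (by simp [hc])
      · exact h hc
    rw [if_neg hne, alt_eq rows h]
    exact rowLoop_zero rows
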